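-- pv_equiv track=rewrite | github.com/filiperomero2/ViralUnity | viralunity/scripts/metagenomics_nanopore_v2/scripts/summarize_krona_taxa.py | lineage_at_ranks
-- ===== SOURCE A (Python) =====
-- def lineage_at_ranks(taxid: str, parent, rank_map, name_map, wanted):
--     """
--     Walk up taxonomy until root, collecting first hit for wanted ranks.
--     Returns dict rank -> (taxid, name)
--     """
--     out = {r: (None, None) for r in wanted}
--     cur = taxid
--     visited = set()
--
--     while cur and cur not in visited:
--         visited.add(cur)
--         r = rank_map.get(cur)
--         if r in wanted and out[r][0] is None:
--             out[r] = (cur, name_map.get(cur, ""))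
--         cur = parent.get(cur)
--
--     return out
-- ===== SOURCE B (Python) =====
-- def lineage_at_ranks(taxid: str, parent, rank_map, name_map, wanted):
--     """
--     Two-pass version: first collect the upward ancestor chain (stopping at the
--     root or on a cycle), then pick for each wanted rank the closest ancestor
--     carrying that rank.
--     """
--     ancestors = []
--     seen = set()
--     cur = taxid
--     while cur and cur not in seen:
--         seen.add(cur)
--         ancestors.append(cur)
--         cur = parent.get(cur)
--
--     out = {}
--     for r in wanted:
--         hit = next((n for n in ancestors if rank_map.get(n) == r), None)
--         out[r] = (hit, name_map.get(hit, "")) if hit is not None else (None, None)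
--     return out
-- ===== Notes on version B (the rewrite author's own statement) =====
-- stated objective: alternative
-- what changed: A interleaves rank matching with the upward walk in one loop over a pre-initialized result dict; B first builds the ancestor chain as a list, then for each wanted rank scans that chain for the first (closest) ancestor carrying the rank.
import Mathlib
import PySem

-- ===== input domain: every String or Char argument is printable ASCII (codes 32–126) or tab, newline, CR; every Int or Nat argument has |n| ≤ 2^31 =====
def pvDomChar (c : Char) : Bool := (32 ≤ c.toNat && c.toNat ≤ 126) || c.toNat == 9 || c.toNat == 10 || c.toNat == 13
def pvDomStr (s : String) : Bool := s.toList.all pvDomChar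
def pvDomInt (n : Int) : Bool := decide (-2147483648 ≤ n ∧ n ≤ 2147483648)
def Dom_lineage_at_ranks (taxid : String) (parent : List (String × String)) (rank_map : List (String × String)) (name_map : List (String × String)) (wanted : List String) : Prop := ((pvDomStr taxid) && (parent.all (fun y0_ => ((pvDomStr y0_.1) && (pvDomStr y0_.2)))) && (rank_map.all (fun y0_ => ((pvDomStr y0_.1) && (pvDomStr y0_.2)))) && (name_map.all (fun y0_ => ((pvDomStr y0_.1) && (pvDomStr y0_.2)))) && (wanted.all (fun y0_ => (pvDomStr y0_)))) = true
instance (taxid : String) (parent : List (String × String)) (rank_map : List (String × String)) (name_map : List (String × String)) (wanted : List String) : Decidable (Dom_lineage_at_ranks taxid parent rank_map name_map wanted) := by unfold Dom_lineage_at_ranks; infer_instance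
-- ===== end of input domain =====

-- B decomposes A's single stateful walk into two passes: build the ancestor chain, then
-- look up each wanted rank's closest ancestor in it (objective: alternative decomposition).

-- ===== PORT A =====
-- the while loop of A; fuel = parent.length + 1 bounds the number of body executions
-- (each iteration adds a fresh element of {taxid} ∪ values(parent) to visited), so the
-- fuel never runs out before the loop condition fails.
def pvLoopA (parent rank_map name_map : PySem.Dict String String) (wanted : List String) :
    Nat → Option String → PySem.Set String →
    PySem.Dict String (Option String × Option String) →
    PySem.Dict String (Option String × Option String)
  | 0, _, _, out => out
  | fuel + 1, cur, visited, out =>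
    match cur with
    | none => out
    | some c =>
      if c = "" ∨ visited.contains c then out
      else
        let visited' := PySem.Set.add visited c
        let out' :=
          match rank_map.get? c with
          | some r =>
            if wanted.contains r ∧ (out.getD r (none, none)).1 = none then
              out.insert r (some c, some (name_map.getD c ""))
            else out
          | none => out
        pvLoopA parent rank_map name_map wanted fuel (parent.get? c) visited' out'

def lineage_at_ranks (taxid : String) (parent : List (String × String)) (rank_map : List (String × String)) (name_map : List (String × String)) (wanted : List String) : List (String × Option String × Option String) :=
  let out0 : PySem.Dict String (Option String × Option String) :=
    wanted.foldl (fun d r => d.insert r (none, none)) PySem.Dict.empty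
  (pvLoopA (PySem.Dict.mk parent) (PySem.Dict.mk rank_map) (PySem.Dict.mk name_map)
      wanted (parent.length + 1) (some taxid) PySem.Set.empty out0).items

-- ===== PORT B =====
-- pass 1 of B: the ancestor chain, same stopping rule (root / falsy / cycle), same fuel bound
def pvChain (parent : PySem.Dict String String) :
    Nat → Option String → PySem.Set String → List String
  | 0, _, _ => []
  | fuel + 1, cur, seen =>
    match cur with
    | none => []
    | some c =>
      if c = "" ∨ seen.contains c then []
      else c :: pvChain parent fuel (parent.get? c) (PySem.Set.add seen c)

def lineage_at_ranks_alt (taxid : String) (parent : List (String × String)) (rank_map : List (String × String)) (name_map : List (String × String)) (wanted : List String) : List (String × Option String × Option String) :=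
  let rank_d := PySem.Dict.mk rank_map
  let name_d := PySem.Dict.mk name_map
  let ancestors := pvChain (PySem.Dict.mk parent) (parent.length + 1) (some taxid) PySem.Set.empty
  (wanted.foldl (fun out r =>
      match ancestors.find? (fun n => rank_d.get? n == some r) with
      | some n => out.insert r (some n, some (name_d.getD n ""))
      | none => out.insert r (none, none))
    PySem.Dict.empty).items

-- ===== PRECONDITION & SPEC =====
def Spec_lineage_at_ranks (taxid : String) (parent : List (String × String)) (rank_map : List (String × String)) (name_map : List (String × String)) (wanted : List String) (out : List (String × Option String × Option String)) : Prop := out = lineage_at_ranks_alt taxid parent rank_map name_map wanted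
instance (taxid : String) (parent : List (String × String)) (rank_map : List (String × String)) (name_map : List (String × String)) (wanted : List String) (out : List (String × Option String × Option String)) : Decidable (Spec_lineage_at_ranks taxid parent rank_map name_map wanted out) := by unfold Spec_lineage_at_ranks; infer_instance

-- ===== CLAIM (what is proved, stated in full; the proofs are below) =====
def Claim_equal_lineage_at_ranks : Prop := ∀ (taxid : String) (parent : List (String × String)) (rank_map : List (String × String)) (name_map : List (String × String)) (wanted : List String), Dom_lineage_at_ranks taxid parent rank_map name_map wanted → Spec_lineage_at_ranks taxid parent rank_map name_map wanted (lineage_at_ranks taxid parent rank_map name_map wanted)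

-- ===== LEMMAS AND PROOFS =====

-- per-ancestor update step of A, as a function foldable over the chain
def pvStep (rank_map name_map : PySem.Dict String String) (wanted : List String)
    (out : PySem.Dict String (Option String × Option String)) (c : String) :
    PySem.Dict String (Option String × Option String) :=
  match rank_map.get? c with
  | some r =>
    if wanted.contains r ∧ (out.getD r (none, none)).1 = none then
      out.insert r (some c, some (name_map.getD c ""))
    else out
  | none => out

-- value B assigns to rank r, given the chain and previous value v (at top level v = (none, none))
def pvVal (rank_map name_map : PySem.Dict String String) (anc : List String)
    (v : Option String × Option String) (r : String) : Option String × Option String :=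
  if v.1 ≠ none then v
  else
    match anc.find? (fun n => rank_map.get? n == some r) with
    | some n => (some n, some (name_map.getD n ""))
    | none => v

lemma pvLoopA_eq_foldl (parent rank_map name_map : PySem.Dict String String)
    (wanted : List String) :
    ∀ (fuel : Nat) (cur : Option String) (vis : PySem.Set String)
      (out : PySem.Dict String (Option String × Option String)),
      pvLoopA parent rank_map name_map wanted fuel cur vis out =
        (pvChain parent fuel cur vis).foldl (pvStep rank_map name_map wanted) out := by
  intro fuel
  induction fuel with
  | zero => intro cur vis out; simp [pvLoopA, pvChain]
  | succ n ih =>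
    intro cur vis out
    cases cur with
    | none => simp [pvLoopA, pvChain]
    | some c =>
      by_cases h : c = "" ∨ c ∈ vis
      · simp only [pvLoopA, pvChain]
        rw [if_pos (by simpa [List.contains_iff_mem] using h),
            if_pos (by simpa [List.contains_iff_mem] using h)]
        simp
      · simp only [pvLoopA, pvChain]
        rw [if_neg (by simpa [List.contains_iff_mem] using h),
            if_neg (by simpa [List.contains_iff_mem] using h)]
        simp only [List.foldl_cons, ih]
        rfl

-- getD of a nodup association list at a present key is that entry's value
lemma pvGetD_of_mem {V : Type} (L : List (String × V)) (p : String × V) (d : V)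
    (hnd : (L.map (·.1)).Nodup) (hp : p ∈ L) :
    (PySem.Dict.mk L).getD p.1 d = p.2 := by
  induction L with
  | nil => cases hp
  | cons q rest ih =>
    simp only [List.map_cons, List.nodup_cons] at hnd
    cases hp with
    | head => simp [PySem.Dict.getD, PySem.Dict.get?, List.find?]
    | tail _ hp =>
      have hne : q.1 ≠ p.1 := fun h => hnd.1 (h ▸ List.mem_map_of_mem hp)
      have := ih hnd.2 hp
      simpa [PySem.Dict.getD, PySem.Dict.get?, List.find?_cons, hne] using this

-- insert at a present key of a nodup association list replaces that entry in place
lemma pvInsert_of_mem {V : Type} (L : List (String × V)) (k : String) (v : V)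
    (hk : k ∈ L.map (·.1)) :
    (PySem.Dict.mk L).insert k v =
      PySem.Dict.mk (L.map (fun p => if p.1 = k then (k, v) else p)) := by
  have hc : (PySem.Dict.mk L).contains k = true := by
    simp only [PySem.Dict.contains, List.any_eq_true]
    obtain ⟨p, hp, he⟩ := List.mem_map.mp hk
    exact ⟨p, hp, by simp [he]⟩
  simp only [PySem.Dict.insert, hc, if_pos]
  congr 1
  apply List.map_congr_left
  intro p _
  by_cases h : p.1 = k <;> simp [h]

-- unfolding pvVal over a cons of the chain
lemma pvVal_cons (rank_map name_map : PySem.Dict String String) (n : String)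
    (rest : List String) (v : Option String × Option String) (r : String) :
    pvVal rank_map name_map (n :: rest) v r =
      if v.1 = none ∧ rank_map.get? n = some r then (some n, some (name_map.getD n ""))
      else pvVal rank_map name_map rest v r := by
  by_cases hv : v.1 = none
  · by_cases hh : rank_map.get? n = some r
    · simp [pvVal, hv, hh]
    · have : (rank_map.get? n == some r) = false := by simpa using hh
      simp [pvVal, hv, hh, this]
  · simp [pvVal, hv]

-- entries with distinct keys that agree on getD are equal
lemma pvEq_of_getD {V : Type} (L : List (String × V)) (p q : String × V) (d : V)
    (hnd : (L.map (·.1)).Nodup) (hp : p ∈ L) (hq : q ∈ L) (h : p.1 = q.1) : p = q := by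
  have h1 := pvGetD_of_mem L p d hnd hp
  have h2 := pvGetD_of_mem L q d hnd hq
  have hv : p.2 = q.2 := by rw [← h1, ← h2, h]
  exact Prod.ext h hv

-- folding A's step over the chain rewrites each value with pvVal
lemma pvFold_step_eq (rank_map name_map : PySem.Dict String String) (wanted : List String) :
    ∀ (anc : List String) (L : List (String × (Option String × Option String))),
      (L.map (·.1)).Nodup →
      (∀ r ∈ wanted, r ∈ L.map (·.1)) →
      (∀ p ∈ L, p.1 ∈ wanted) →
      anc.foldl (pvStep rank_map name_map wanted) (PySem.Dict.mk L) =
        PySem.Dict.mk (L.map (fun p => (p.1, pvVal rank_map name_map anc p.2 p.1))) := by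
  intro anc
  induction anc with
  | nil =>
    intro L _ _ _
    simp only [List.foldl_nil]
    congr 1
    conv_lhs => rw [← List.map_id L]
    apply List.map_congr_left
    intro p _
    by_cases h : p.2.1 = none <;> simp [pvVal, h, List.find?]
  | cons n rest ih =>
    intro L hnd hcov hsub
    simp only [List.foldl_cons]
    cases hr : rank_map.get? n with
    | none =>
      rw [show pvStep rank_map name_map wanted (PySem.Dict.mk L) n = PySem.Dict.mk L by
            simp [pvStep, hr]]
      rw [ih L hnd hcov hsub]
      congr 1
      apply List.map_congr_left
      intro p _
      simp [pvVal_cons, hr]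
    | some r =>
      by_cases hw : r ∈ wanted
      · have hkey : r ∈ L.map (·.1) := hcov r hw
        obtain ⟨q, hq, hq1⟩ := List.mem_map.mp hkey
        have hgd : (PySem.Dict.mk L).getD r (none, none) = q.2 :=
          hq1 ▸ pvGetD_of_mem L q _ hnd hq
        by_cases hnone : q.2.1 = none
        · -- condition holds: insert (some n, name) at r, which is q's slot
          have hstep : pvStep rank_map name_map wanted (PySem.Dict.mk L) n =
              PySem.Dict.mk (L.map (fun p => if p.1 = r then (r, (some n, some (name_map.getD n ""))) else p)) := by
            simp only [pvStep, hr, hgd]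
            rw [if_pos ⟨by simpa using hw, hnone⟩]
            exact pvInsert_of_mem L r _ hkey
          rw [hstep]
          have hkeys : (L.map (fun p => if p.1 = r then (r, ((some n : Option String), some (name_map.getD n ""))) else p)).map (·.1) = L.map (·.1) := by
            rw [List.map_map]
            apply List.map_congr_left
            intro p _
            by_cases h : p.1 = r <;> simp [h]
          rw [ih _ (by rw [hkeys]; exact hnd) (by rw [hkeys]; exact hcov)
                (by intro p hp
                    obtain ⟨p0, hp0, he⟩ := List.mem_map.mp hp
                    by_cases h : p0.1 = r
                    · simp only [h, if_pos] at he; rw [← he]; exact hw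
                    · simp only [h, if_neg, not_false_iff] at he; rw [← he]; exact hsub p0 hp0)]
          rw [List.map_map]
          congr 1
          apply List.map_congr_left
          intro p hp
          by_cases h : p.1 = r
          · have hpq : p = q := pvEq_of_getD L p q (none, none) hnd hp hq (h.trans hq1.symm)
            have hv : p.2.1 = none := hpq ▸ hnone
            simp only [Function.comp, h, if_pos]
            rw [pvVal_cons, if_pos ⟨hv, hr⟩]
            simp [pvVal]
          · simp only [Function.comp, h, if_neg, not_false_iff]
            rw [pvVal_cons, if_neg (by rintro ⟨-, he⟩; exact h (Option.some_inj.mp (hr.symm.trans he)).symm)]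
        · -- condition fails: out unchanged, and pvVal keeps q's already-set value
          have hstep : pvStep rank_map name_map wanted (PySem.Dict.mk L) n = PySem.Dict.mk L := by
            simp [pvStep, hr, hgd, hnone]
          rw [hstep, ih L hnd hcov hsub]
          congr 1
          apply List.map_congr_left
          intro p hp
          rw [pvVal_cons, if_neg]
          rintro ⟨hv, he⟩
          have h : p.1 = r := (Option.some_inj.mp (hr.symm.trans he)).symm
          have hpq : p = q := pvEq_of_getD L p q (none, none) hnd hp hq (h.trans hq1.symm)
          exact hnone (hpq ▸ hv)
      · -- rank not wanted: step is the identity and no key of L equals r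
        have hstep : pvStep rank_map name_map wanted (PySem.Dict.mk L) n = PySem.Dict.mk L := by
          simp only [pvStep, hr]
          rw [if_neg (by rintro ⟨hw2, -⟩; exact hw (by simpa using hw2))]
        rw [hstep, ih L hnd hcov hsub]
        congr 1
        apply List.map_congr_left
        intro p hp
        rw [pvVal_cons, if_neg]
        rintro ⟨-, he⟩
        exact hw (by rw [Option.some_inj.mp (hr.symm.trans he)]; exact hsub p hp)

-- folding key-determined inserts over wanted builds the dedup'd table
lemma pvFold_insert_eq {V : Type} (v : String → V) :
    ∀ (xs : List String) (M : PySem.Set String),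
      M.Nodup →
      xs.foldl (fun d r => d.insert r (v r)) (PySem.Dict.mk (M.map (fun r => (r, v r)))) =
        PySem.Dict.mk ((PySem.Set.update M xs).map (fun r => (r, v r))) := by
  intro xs
  induction xs with
  | nil => intro M _; simp [PySem.Set.update]
  | cons x rest ih =>
    intro M hnd
    simp only [List.foldl_cons]
    rw [show PySem.Set.update M (x :: rest) = PySem.Set.update (PySem.Set.add M x) rest from by
          simp [PySem.Set.update]]
    by_cases hx : x ∈ M
    · have hadd : PySem.Set.add M x = M := by simp [PySem.Set.add, hx]
      have hmem : x ∈ (M.map (fun r => (r, v r))).map (·.1) := by simpa using hx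
      rw [pvInsert_of_mem _ x (v x) hmem]
      have hfix : (M.map (fun r => (r, v r))).map (fun p => if p.1 = x then (x, v x) else p) =
          M.map (fun r => (r, v r)) := by
        rw [List.map_map]
        apply List.map_congr_left
        intro r _
        by_cases h : r = x <;> simp [h]
      rw [hfix, hadd]
      exact ih M hnd
    · have hc : (PySem.Dict.mk (M.map (fun r => (r, v r)))).contains x = false := by
        simp [PySem.Dict.contains]
        intro p hp he
        exact hx (he ▸ hp)
      rw [show (PySem.Dict.mk (M.map (fun r => (r, v r)))).insert x (v x) =
            PySem.Dict.mk ((M ++ [x]).map (fun r => (r, v r))) from by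
          simp [PySem.Dict.insert, hc]]
      rw [show PySem.Set.add M x = M ++ [x] from by simp [PySem.Set.add, hx]]
      exact ih (M ++ [x]) (by simp [List.nodup_append, hnd]; exact fun a ha he => hx (he ▸ ha))

-- ===== VERDICT (by name: the statement is the Claim_ definition above) =====
theorem lineage_at_ranks_spec : Claim_equal_lineage_at_ranks := by
  intro taxid parent rank_map name_map wanted _
  unfold Spec_lineage_at_ranks lineage_at_ranks lineage_at_ranks_alt
  simp only []
  set P := PySem.Dict.mk parent
  set R := PySem.Dict.mk rank_map
  set N := PySem.Dict.mk name_map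
  set anc := pvChain P (parent.length + 1) (some taxid) PySem.Set.empty with hanc
  -- A's init dict
  have hM : (PySem.Set.ofList wanted).Nodup := PySem.Set.nodup_ofList wanted
  have hinit : wanted.foldl (fun d r => d.insert r ((none : Option String), (none : Option String))) PySem.Dict.empty =
      PySem.Dict.mk ((PySem.Set.ofList wanted).map (fun r => (r, (none, none)))) := by
    have := pvFold_insert_eq (fun _ : String => ((none : Option String), (none : Option String))) wanted [] (by simp)
    simpa [PySem.Dict.empty, PySem.Set.update, PySem.Set.ofList, PySem.List.dedup] using this
  -- B's fold over wanted is the same fold with the value function gB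
  have hB : wanted.foldl (fun out r =>
        match anc.find? (fun n => R.get? n == some r) with
        | some n => out.insert r (some n, some (N.getD n ""))
        | none => out.insert r (none, none)) PySem.Dict.empty =
      PySem.Dict.mk ((PySem.Set.ofList wanted).map
        (fun r => (r, pvVal R N anc (none, none) r))) := by
    have heq : (fun (out : PySem.Dict String (Option String × Option String)) r =>
        match anc.find? (fun n => R.get? n == some r) with
        | some n => out.insert r (some n, some (N.getD n ""))
        | none => out.insert r (none, none)) =
        fun out r => out.insert r (pvVal R N anc (none, none) r) := by
      funext out r
      simp only [pvVal, ne_eq, not_true_eq_false]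
      cases anc.find? (fun n => R.get? n == some r) <;> simp
    rw [heq]
    have := pvFold_insert_eq (fun r => pvVal R N anc (none, none) r) wanted [] (by simp)
    simpa [PySem.Dict.empty, PySem.Set.update, PySem.Set.ofList, PySem.List.dedup] using this
  rw [hB, hinit, pvLoopA_eq_foldl, ← hanc]
  rw [pvFold_step_eq R N wanted anc _
        (by have h2 : List.map ((fun x => x.1) ∘ fun r => (r, (none : Option String), (none : Option String))) (PySem.Set.ofList wanted) = PySem.Set.ofList wanted := by
              simp [Function.comp_def]
            rw [List.map_map, h2]; exact hM)
        (by intro r hr; simp only [List.map_map]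
            simpa using (PySem.Set.mem_ofList wanted r).mpr hr)
        (by intro p hp
            obtain ⟨r, hr, he⟩ := List.mem_map.mp hp
            rw [← he]
            exact (PySem.Set.mem_ofList wanted r).mp hr)]
  simp [List.map_map]
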